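-- pv_equiv track=rewrite | github.com/twbeatles/kiwoom-automatic-trader | app/mixins/market_intelligence.py | _combine_source_statuses
-- ===== SOURCE A (Python) =====
-- from typing import Any, Dict, List, Optional
--
-- def _combine_source_statuses(statuses: List[str]) -> str:
--     normalized = [str(status or "idle") for status in statuses if str(status or "").strip()]
--     if not normalized:
--         return "idle"
--     has_success = any(status in {"fresh", "ok_with_data", "ok_empty"} for status in normalized)
--     has_data = any(status in {"fresh", "ok_with_data"} for status in normalized)
--     has_empty = any(status == "ok_empty" for status in normalized)
--     has_error = any(status == "error" for status in normalized)
--     has_partial = any(status == "partial" for status in normalized)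
--     if has_partial or (has_error and has_success):
--         return "partial"
--     if has_error:
--         return "error"
--     if has_data:
--         return "ok_with_data"
--     if has_empty:
--         return "ok_empty"
--     if all(status == "disabled" for status in normalized):
--         return "disabled"
--     if any(status == "disabled" for status in normalized):
--         return "disabled"
--     return normalized[-1]
-- ===== SOURCE B (Python) =====
-- _RANK = {"partial": 5, "error": 4, "fresh": 3, "ok_with_data": 3, "ok_empty": 2, "disabled": 1}
-- _CANON = {5: "partial", 4: "error", 3: "ok_with_data", 2: "ok_empty", 1: "disabled"}
--
-- def _merge(acc, s):
--     # binary combine of two statuses; acc is always a canonical representative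
--     r = _RANK.get(s, 0)
--     ra = _RANK.get(acc, 0)
--     if (ra == 4 and r in (2, 3)) or (r == 4 and ra in (2, 3)):
--         return "partial"  # error together with a success-class status
--     if r > ra or r == ra == 0:
--         return _CANON.get(r, s)
--     return acc
--
-- def _combine_source_statuses(statuses):
--     acc = None
--     for status in statuses:
--         if not str(status or "").strip():
--             continue
--         s = str(status or "idle")
--         acc = _CANON.get(_RANK.get(s, 0), s) if acc is None else _merge(acc, s)
--     return "idle" if acc is None else acc
-- ===== Notes on version B (the rewrite author's own statement) =====
-- stated objective: alternative
-- what changed: Replaces A's comprehension plus seven scans and a precedence cascade over presence flags by a left fold with a binary merge operator on status values: each status is mapped to a priority rank (partial>error>data>empty>disabled>other) and merged pairwise, with the single extra rule that error merged with a success-class value yields partial; no flags or cascade remain.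
import Mathlib
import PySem

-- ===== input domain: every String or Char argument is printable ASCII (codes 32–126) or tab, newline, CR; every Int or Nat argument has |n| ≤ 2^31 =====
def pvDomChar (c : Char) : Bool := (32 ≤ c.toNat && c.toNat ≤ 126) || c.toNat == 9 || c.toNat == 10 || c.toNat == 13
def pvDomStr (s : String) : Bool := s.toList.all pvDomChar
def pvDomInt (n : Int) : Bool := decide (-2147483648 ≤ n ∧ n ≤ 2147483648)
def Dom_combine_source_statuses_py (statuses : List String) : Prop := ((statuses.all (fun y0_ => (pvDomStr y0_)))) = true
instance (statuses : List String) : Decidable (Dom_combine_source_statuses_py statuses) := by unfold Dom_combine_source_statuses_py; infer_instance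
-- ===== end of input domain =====

-- B replaces A's seven scans and flag cascade by a left fold with a binary rank-based merge
-- operator on status values (alternative algorithm of the same cost).

-- ===== PORT A =====
def combine_source_statuses_py (statuses : List String) : String :=
  -- normalized = [str(status or "idle") for status in statuses if str(status or "").strip()]
  let normalized :=
    (statuses.filter (fun status =>
        PySem.Str.strip (if status = "" then "" else status) != "")).map
      (fun status => if status = "" then "idle" else status)
  if normalized = [] then "idle"
  else
    let has_success := normalized.any (fun s => s == "fresh" || s == "ok_with_data" || s == "ok_empty")
    let has_data := normalized.any (fun s => s == "fresh" || s == "ok_with_data")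
    let has_empty := normalized.any (fun s => s == "ok_empty")
    let has_error := normalized.any (fun s => s == "error")
    let has_partial := normalized.any (fun s => s == "partial")
    if has_partial || (has_error && has_success) then "partial"
    else if has_error then "error"
    else if has_data then "ok_with_data"
    else if has_empty then "ok_empty"
    else if normalized.all (fun s => s == "disabled") then "disabled"
    else if normalized.any (fun s => s == "disabled") then "disabled"
    else (normalized.getLast?).getD "idle"  -- normalized[-1]; guarded nonempty above

-- ===== PORT B =====
-- _RANK.get(s, 0)
def pvRank (s : String) : Nat :=
  if s == "partial" then 5
  else if s == "error" then 4
  else if s == "fresh" || s == "ok_with_data" then 3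
  else if s == "ok_empty" then 2
  else if s == "disabled" then 1
  else 0

-- _CANON.get(r, s)
def pvCanon (r : Nat) (s : String) : String :=
  match r with
  | 5 => "partial"
  | 4 => "error"
  | 3 => "ok_with_data"
  | 2 => "ok_empty"
  | 1 => "disabled"
  | _ => s

-- _merge(acc, s)
def pvMerge (acc s : String) : String :=
  if (pvRank acc == 4 && (pvRank s == 2 || pvRank s == 3)) || (pvRank s == 4 && (pvRank acc == 2 || pvRank acc == 3)) then "partial"
  else if pvRank s > pvRank acc || (pvRank s == pvRank acc && pvRank s == 0) then pvCanon (pvRank s) s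
  else acc

-- the accumulator update: first kept element is canonicalized, later ones merged in
def pvStep (acc : Option String) (s : String) : Option String :=
  match acc with
  | none => some (pvCanon (pvRank s) s)
  | some a => some (pvMerge a s)

-- loop body including the `str(status or "").strip()` filter and `str(status or "idle")`
def pvBStep (acc : Option String) (status : String) : Option String :=
  if PySem.Str.strip (if status = "" then "" else status) = "" then acc
  else pvStep acc (if status = "" then "idle" else status)

def combine_source_statuses_py_alt (statuses : List String) : String :=
  match statuses.foldl pvBStep none with
  | none => "idle"
  | some a => a

-- ===== PRECONDITION & SPEC =====
def Spec_combine_source_statuses_py (statuses : List String) (out : String) : Prop := out = combine_source_statuses_py_alt statuses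
instance (statuses : List String) (out : String) : Decidable (Spec_combine_source_statuses_py statuses out) := by unfold Spec_combine_source_statuses_py; infer_instance

-- ===== CLAIM (what is proved, stated in full; the proofs are below) =====
def Claim_equal_combine_source_statuses_py : Prop := ∀ (statuses : List String), Dom_combine_source_statuses_py statuses → Spec_combine_source_statuses_py statuses (combine_source_statuses_py statuses)

-- ===== LEMMAS AND PROOFS =====

-- the normalized list A builds
def pvNorm (statuses : List String) : List String :=
  (statuses.filter (fun status =>
      PySem.Str.strip (if status = "" then "" else status) != "")).map
    (fun status => if status = "" then "idle" else status)

-- the combined answer as a function of the normalized list (flag form, disabled branches merged)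
def ansN (l : List String) : String :=
  if l.any (· == "partial") || (l.any (· == "error") && l.any (fun s => s == "fresh" || s == "ok_with_data" || s == "ok_empty")) then "partial"
  else if l.any (· == "error") then "error"
  else if l.any (fun s => s == "fresh" || s == "ok_with_data") then "ok_with_data"
  else if l.any (· == "ok_empty") then "ok_empty"
  else if l.any (· == "disabled") then "disabled"
  else l.getLast?.getD "idle"

lemma rank0_ne (a : String) (h : pvRank a = 0) :
    a ≠ "partial" ∧ a ≠ "error" ∧ a ≠ "fresh" ∧ a ≠ "ok_with_data" ∧ a ≠ "ok_empty" ∧ a ≠ "disabled" := by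
  unfold pvRank at h; split_ifs at h <;> simp_all

lemma classA (a : String) (ha : a ≠ "fresh") :
    a = "partial" ∨ a = "error" ∨ a = "ok_with_data" ∨ a = "ok_empty" ∨ a = "disabled" ∨ pvRank a = 0 := by
  unfold pvRank; split_ifs with h1 h2 h3 h4 h5 <;> simp_all

lemma classS (s : String) :
    s = "partial" ∨ s = "error" ∨ s = "fresh" ∨ s = "ok_with_data" ∨ s = "ok_empty" ∨ s = "disabled" ∨ pvRank s = 0 := by
  unfold pvRank; split_ifs with h1 h2 h3 h4 h5 <;> simp_all <;> tauto

lemma canon_ne_fresh (s : String) : pvCanon (pvRank s) s ≠ "fresh" := by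
  unfold pvRank pvCanon; split_ifs <;> simp_all

lemma merge_ne_fresh (a s : String) (ha : a ≠ "fresh") : pvMerge a s ≠ "fresh" := by
  unfold pvMerge
  split_ifs with h1 h2
  · decide
  · exact canon_ne_fresh s
  · exact ha

lemma ansN_single (a : String) (ha : a ≠ "fresh") : ansN [a] = a := by
  rcases classA a ha with h | h | h | h | h | h
  · subst h; simp [ansN]
  · subst h; simp [ansN]
  · subst h; simp [ansN]
  · subst h; simp [ansN]
  · subst h; simp [ansN]
  · obtain ⟨n1, n2, n3, n4, n5, n6⟩ := rank0_ne a h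
    simp [ansN, n1, n2, n3, n4, n5, n6]

lemma canon_correct (x : String) (l : List String) :
    ansN (pvCanon (pvRank x) x :: l) = ansN (x :: l) := by
  rcases classS x with h | h | h | h | h | h | h
  · subst h; rfl
  · subst h; rfl
  · subst h; simp [pvRank, pvCanon, ansN]
  · subst h; rfl
  · subst h; rfl
  · subst h; rfl
  · obtain ⟨n1, n2, n3, n4, n5, n6⟩ := rank0_ne x h
    simp [pvCanon, h]

lemma merge_correct (a s : String) (l : List String) (ha : a ≠ "fresh") :
    ansN (pvMerge a s :: l) = ansN (a :: s :: l) := by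
  rcases classA a ha with h | h | h | h | h | h <;>
    rcases classS s with hs | hs | hs | hs | hs | hs | hs <;>
      first
      | (subst h; subst hs; simp [pvMerge, pvRank, pvCanon, ansN, List.any_cons])
      | (subst h
         obtain ⟨m1, m2, m3, m4, m5, m6⟩ := rank0_ne s hs
         simp [pvMerge, pvRank, ansN, List.any_cons, m1, m2, m3, m4, m5, m6])
      | (subst hs
         obtain ⟨n1, n2, n3, n4, n5, n6⟩ := rank0_ne a h
         simp [pvMerge, pvRank, pvCanon, ansN, List.any_cons, n1, n2, n3, n4, n5, n6])
      | (obtain ⟨m1, m2, m3, m4, m5, m6⟩ := rank0_ne s hs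
         obtain ⟨n1, n2, n3, n4, n5, n6⟩ := rank0_ne a h
         simp [pvMerge, pvRank, pvCanon, ansN, List.any_cons,
               n1, n2, n3, n4, n5, n6, m1, m2, m3, m4, m5, m6])

lemma fold_filter (l : List String) (acc : Option String) :
    l.foldl pvBStep acc = (pvNorm l).foldl pvStep acc := by
  induction l generalizing acc with
  | nil => rfl
  | cons x xs ih =>
    by_cases h : PySem.Str.strip (if x = "" then "" else x) = ""
    · have hn : pvNorm (x :: xs) = pvNorm xs := by simp [pvNorm, h]
      simp [List.foldl_cons, pvBStep, h, ih, hn]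
    · have hn : pvNorm (x :: xs) = (if x = "" then "idle" else x) :: pvNorm xs := by
        simp [pvNorm, h]
      simp [List.foldl_cons, pvBStep, h, ih, hn]

lemma fold_some (l : List String) (a : String) (ha : a ≠ "fresh") :
    l.foldl pvStep (some a) = some (ansN (a :: l)) := by
  induction l generalizing a with
  | nil => simp [ansN_single a ha]
  | cons s xs ih =>
    rw [List.foldl_cons]
    show xs.foldl pvStep (some (pvMerge a s)) = _
    rw [ih (pvMerge a s) (merge_ne_fresh a s ha), merge_correct a s xs ha]

lemma alt_eq_ansN (statuses : List String) (h : pvNorm statuses ≠ []) :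
    combine_source_statuses_py_alt statuses = ansN (pvNorm statuses) := by
  unfold combine_source_statuses_py_alt
  rw [fold_filter]
  obtain ⟨x, xs, hx⟩ : ∃ x xs, pvNorm statuses = x :: xs := by
    cases hc : pvNorm statuses with
    | nil => exact absurd hc h
    | cons x xs => exact ⟨x, xs, rfl⟩
  rw [hx, List.foldl_cons,
    show pvStep none x = some (pvCanon (pvRank x) x) from rfl,
    fold_some xs _ (canon_ne_fresh x), canon_correct x xs]

lemma alt_empty (statuses : List String) (h : pvNorm statuses = []) :
    combine_source_statuses_py_alt statuses = "idle" := by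
  unfold combine_source_statuses_py_alt
  rw [fold_filter, h]
  rfl

lemma all_imp_any (l : List String) (h : l ≠ []) (p : String → Bool)
    (ha : l.all p = true) : l.any p = true := by
  cases l with
  | nil => exact absurd rfl h
  | cons x xs => simp_all

lemma A_eq (statuses : List String) :
    combine_source_statuses_py statuses =
      (if pvNorm statuses = [] then "idle"
       else
        if (pvNorm statuses).any (fun s => s == "partial")
            || ((pvNorm statuses).any (fun s => s == "error")
                && (pvNorm statuses).any (fun s => s == "fresh" || s == "ok_with_data" || s == "ok_empty")) then "partial"
        else if (pvNorm statuses).any (fun s => s == "error") then "error"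
        else if (pvNorm statuses).any (fun s => s == "fresh" || s == "ok_with_data") then "ok_with_data"
        else if (pvNorm statuses).any (fun s => s == "ok_empty") then "ok_empty"
        else if (pvNorm statuses).all (fun s => s == "disabled") then "disabled"
        else if (pvNorm statuses).any (fun s => s == "disabled") then "disabled"
        else ((pvNorm statuses).getLast?).getD "idle") := rfl

lemma A_eq_ansN (statuses : List String) (h : pvNorm statuses ≠ []) :
    combine_source_statuses_py statuses = ansN (pvNorm statuses) := by
  rw [A_eq, if_neg h]
  unfold ansN
  split_ifs <;> try rfl
  all_goals (rename_i hall hany; exact absurd (all_imp_any _ h _ hall) hany)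

-- ===== VERDICT (by name: the statement is the Claim_ definition above) =====
theorem combine_source_statuses_py_spec : Claim_equal_combine_source_statuses_py := by
  intro statuses _
  show combine_source_statuses_py statuses = combine_source_statuses_py_alt statuses
  by_cases h : pvNorm statuses = []
  · rw [alt_empty statuses h]
    show (if pvNorm statuses = [] then "idle" else _) = "idle"
    rw [if_pos h]
  · rw [A_eq_ansN statuses h, alt_eq_ansN statuses h]
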